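-- pv_equiv track=rewrite | github.com/JingyL/GPtest | findWord.py | findAllWord
-- ===== SOURCE A (Python) =====
-- def findAllWord(str):
--   wordList = str.split()
--   res = []
--   stack = []
--
--   for i in range(len(wordList)):
--     if not stack:
--         stack = [wordList[i]]
--     elif stack[-1] != wordList[i]:
--         if len(stack) > 1:
--               stack[-1] += ","
--               res += stack
--         stack = [wordList[i]]
--     else:
--         stack.append(wordList[i])
--
--   if stack:
--        res += stack
--   return " ".join(res)
-- ===== SOURCE B (Python) =====
-- def findAllWord(str):
--     # Two-pass: build (word, count) groups of consecutive equal words, then emit.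
--     groups = []
--     for w in str.split():
--         if groups and groups[-1][0] == w:
--             groups[-1][1] += 1
--         else:
--             groups.append([w, 1])
--     res = []
--     for i, (w, k) in enumerate(groups):
--         if i == len(groups) - 1:
--             res += [w] * k
--         elif k > 1:
--             res += [w] * (k - 1) + [w + ","]
--     return " ".join(res)
-- ===== Notes on version B (the rewrite author's own statement) =====
-- stated objective: simpler
-- what changed: Replaces A's single-pass stack machine (mutating a run buffer and flushing it with a comma patch) with a two-pass run-length encoding: build (word,count) groups, then emit each group by a simple rule depending on whether it is last.
import Mathlib
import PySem

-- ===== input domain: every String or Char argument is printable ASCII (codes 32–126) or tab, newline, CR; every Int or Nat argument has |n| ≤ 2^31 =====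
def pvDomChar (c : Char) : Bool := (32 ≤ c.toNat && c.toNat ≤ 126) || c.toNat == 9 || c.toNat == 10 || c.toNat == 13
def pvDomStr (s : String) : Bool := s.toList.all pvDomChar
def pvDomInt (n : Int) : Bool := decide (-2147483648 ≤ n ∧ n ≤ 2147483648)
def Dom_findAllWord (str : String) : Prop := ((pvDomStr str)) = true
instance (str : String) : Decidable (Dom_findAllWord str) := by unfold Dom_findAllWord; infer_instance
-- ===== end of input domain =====

-- B replaces A's single-pass stack machine by a two-pass run-length encoding
-- (build (word,count) groups, then emit each group by a last-aware rule); objective: simpler.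

-- ===== PORT A =====
-- one loop iteration of A: state (res, stack)
def pvAStep (p : List String × List String) (w : String) : List String × List String :=
  if p.2 = [] then (p.1, [w])
  else if p.2.getLast? ≠ some w then
    (if p.2.length > 1 then
      (p.1 ++ (p.2.dropLast ++ [(p.2.getLast?.getD "") ++ ","]), [w])
     else (p.1, [w]))
  else (p.1, p.2 ++ [w])

def findAllWord (str : String) : String :=
  let wordList := PySem.Str.split₀ str
  let p := List.foldl pvAStep ([], []) wordList
  PySem.Str.join " " (p.1 ++ p.2)

-- ===== PORT B =====
-- B pass 1: fold building the (word,count) groups, incrementing the last group in place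
def pvBStep (gs : List (String × Nat)) (w : String) : List (String × Nat) :=
  match gs.getLast? with
  | some (w', k) => if w' = w then gs.dropLast ++ [(w', k + 1)] else gs ++ [(w, 1)]
  | none => [(w, 1)]

-- B pass 2: emit each group; "rest = []" is Source B's "i == len(groups) - 1"
def pvEmit : List (String × Nat) → List String
  | [] => []
  | (w, k) :: rest =>
    if rest.isEmpty then List.replicate k w
    else (if k > 1 then List.replicate (k - 1) w ++ [w ++ ","] else []) ++ pvEmit rest

def findAllWord_alt (str : String) : String :=
  PySem.Str.join " " (pvEmit (List.foldl pvBStep [] (PySem.Str.split₀ str)))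

-- ===== PRECONDITION & SPEC =====
def Spec_findAllWord (str : String) (out : String) : Prop := out = findAllWord_alt str
instance (str : String) (out : String) : Decidable (Spec_findAllWord str out) := by unfold Spec_findAllWord; infer_instance

-- ===== CLAIM (what is proved, stated in full; the proofs are below) =====
def Claim_equal_findAllWord : Prop := ∀ (str : String), Dom_findAllWord str → Spec_findAllWord str (findAllWord str)

-- ===== LEMMAS AND PROOFS =====

-- recursive characterisation of consecutive run-length groups (proof-only helper)
def pvGrpAux (w : String) (k : Nat) : List String → List (String × Nat)
  | [] => [(w, k)]
  | x :: xs => if x = w then pvGrpAux w (k + 1) xs else (w, k) :: pvGrpAux x 1 xs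

theorem pvGrpAux_ne_nil (w : String) (k : Nat) (ws : List String) :
    pvGrpAux w k ws ≠ [] := by
  induction ws generalizing w k with
  | nil => simp [pvGrpAux]
  | cons x xs ih =>
    simp only [pvGrpAux]
    split_ifs with h
    · exact ih w (k + 1)
    · simp

theorem pvB_build (ws : List String) :
    ∀ (pre : List (String × Nat)) (w : String) (k : Nat),
    List.foldl pvBStep (pre ++ [(w, k)]) ws = pre ++ pvGrpAux w k ws := by
  induction ws with
  | nil => intro pre w k; simp [pvGrpAux]
  | cons x xs ih =>
    intro pre w k
    simp only [List.foldl_cons, pvBStep, pvGrpAux, List.getLast?_concat]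
    by_cases h : x = w
    · simp [h, ih pre w (k + 1)]
    · have hne : ¬ w = x := fun hc => h hc.symm
      simp only [hne, if_false, if_neg h]
      rw [ih (pre ++ [(w, k)]) x 1]
      simp

theorem pvA_loop (ws : List String) :
    ∀ (res : List String) (w : String) (k : Nat),
    (List.foldl pvAStep (res, List.replicate (k + 1) w) ws).1 ++
      (List.foldl pvAStep (res, List.replicate (k + 1) w) ws).2
    = res ++ pvEmit (pvGrpAux w (k + 1) ws) := by
  induction ws with
  | nil =>
    intro res w k
    simp [pvGrpAux, pvEmit]
  | cons x xs ih =>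
    intro res w k
    have hnil : ¬ (List.replicate (k + 1) w = ([] : List String)) := by simp
    have hlast : (List.replicate (k + 1) w).getLast? = some w := by
      rw [List.replicate_succ', List.getLast?_concat]
    by_cases h : x = w
    · -- run continues
      subst h
      have hstep : pvAStep (res, List.replicate (k + 1) x) x
          = (res, List.replicate (k + 1 + 1) x) := by
        unfold pvAStep
        rw [if_neg hnil]
        simp only [hlast, ne_eq, not_true_eq_false, if_false]
        rw [← List.replicate_succ']
      rw [List.foldl_cons, hstep]
      rw [show pvGrpAux x (k + 1) (x :: xs) = pvGrpAux x (k + 1 + 1) xs from by simp [pvGrpAux]]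
      exact ih res x (k + 1)
    · -- run ends
      have hne' : (List.replicate (k + 1) w).getLast? ≠ some x := by
        rw [hlast]; simp; exact fun hc => h hc.symm
      have hgrp : pvGrpAux w (k + 1) (x :: xs) = (w, k + 1) :: pvGrpAux x 1 xs := by
        simp [pvGrpAux, h]
      have hdrop : (List.replicate (k + 1) w).dropLast = List.replicate k w := by
        rw [List.replicate_succ', List.dropLast_concat]
      have hre : (pvGrpAux x 1 xs).isEmpty = false := by
        simp [pvGrpAux_ne_nil x 1 xs]
      by_cases hk : k > 0
      · have hlen : (List.replicate (k + 1) w).length > 1 := by simp; omega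
        have hstep : pvAStep (res, List.replicate (k + 1) w) x
            = (res ++ (List.replicate k w ++ [w ++ ","]), [x]) := by
          unfold pvAStep
          rw [if_neg hnil, if_pos hne', if_pos hlen, hdrop, hlast]
          simp
        rw [List.foldl_cons, hstep, hgrp]
        simp only [pvEmit, hre, Bool.false_eq_true, if_false,
          if_pos (by omega : k + 1 > 1), Nat.add_sub_cancel]
        simpa [List.append_assoc] using ih (res ++ (List.replicate k w ++ [w ++ ","])) x 0
      · have hk0 : k = 0 := by omega
        subst hk0
        have hlen : ¬ ((List.replicate (0 + 1) w).length > 1) := by simp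
        have hstep : pvAStep (res, List.replicate (0 + 1) w) x = (res, [x]) := by
          unfold pvAStep
          rw [if_neg hnil, if_pos hne', if_neg hlen]
        rw [List.foldl_cons, hstep, hgrp]
        simp only [pvEmit, hre, Bool.false_eq_true, if_false,
          (by norm_num : ¬ (0 + 1 > 1)), List.nil_append]
        simpa using ih res x 0

-- ===== VERDICT (by name: the statement is the Claim_ definition above) =====
theorem findAllWord_spec : Claim_equal_findAllWord := by
  intro str _
  unfold Spec_findAllWord findAllWord findAllWord_alt
  cases hws : PySem.Str.split₀ str with
  | nil => simp [pvEmit]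
  | cons w ws =>
    have hA : pvAStep ([], []) w = ([], List.replicate (0 + 1) w) := by simp [pvAStep]
    have hB : pvBStep [] w = [(w, 1)] := by simp [pvBStep]
    have hB2 := pvB_build ws [] w 1
    simp only [List.nil_append] at hB2
    simp only [List.foldl_cons, hA, hB, hB2, pvA_loop ws [] w 0, List.nil_append]
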